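-- pv_equiv track=rewrite | github.com/IENT/PyCabac | tests/utils/contextselector.py | ctx_id_bins_order_n_tu
-- ===== SOURCE A (Python) =====
-- def ctx_id_bins_order_n_tu(order, n, prev_symbols=0, rest_pos=10):
--
--     if n < rest_pos:
--         ctx_id = 0
--         offset = rest_pos
--         for o in range(0, order):
--
--             if n > prev_symbols[o]:  # previously coded bin at same position not available
--                 ctx_id_current = 0
--             elif n < prev_symbols[o]:  # previously coded bin 0 at same position n
--                 ctx_id_current = 1
--             else:  # previously coded bin 1 at same position n
--                 ctx_id_current = 2
--
--             ctx_id += ctx_id_current*offset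
--             offset *= 3
--         # add bin position n
--         ctx_id += n
--
--     else: # rst case, independent of position n
--         ctx_id = (3**order)*rest_pos
--
--     return ctx_id
-- ===== SOURCE B (Python) =====
-- def ctx_id_bins_order_n_tu(order, n, prev_symbols=0, rest_pos=10):
--     if n < rest_pos:
--         # branch-free: the 0/1/2 digit equals [n <= p] + [n == p], so the base-3
--         # value splits into two independent filtered power sums
--         le_sum = sum(3 ** o for o in range(order) if n <= prev_symbols[o])
--         eq_sum = sum(3 ** o for o in range(order) if n == prev_symbols[o])
--         return (le_sum + eq_sum) * rest_pos + n
--     else: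
--         return (3 ** order) * rest_pos
-- ===== Notes on version B (the rewrite author's own statement) =====
-- stated objective: alternative
-- what changed: B never computes the 0/1/2 digit or a running offset/accumulator: it uses the identity digit = [n<=p] + [n==p] to split the base-3 value into two independent filtered sums of powers of 3 (two staged passes), then scales by rest_pos once.
-- outside the precondition, e.g. on ctx_id_bins_order_n_tu(-1, 20, [], 10): A returns 3.333333333333333, B returns 3.333333333333333; on ctx_id_bins_order_n_tu(2, 3, [], 10): A raises IndexError, B raises IndexError
import Mathlib
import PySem

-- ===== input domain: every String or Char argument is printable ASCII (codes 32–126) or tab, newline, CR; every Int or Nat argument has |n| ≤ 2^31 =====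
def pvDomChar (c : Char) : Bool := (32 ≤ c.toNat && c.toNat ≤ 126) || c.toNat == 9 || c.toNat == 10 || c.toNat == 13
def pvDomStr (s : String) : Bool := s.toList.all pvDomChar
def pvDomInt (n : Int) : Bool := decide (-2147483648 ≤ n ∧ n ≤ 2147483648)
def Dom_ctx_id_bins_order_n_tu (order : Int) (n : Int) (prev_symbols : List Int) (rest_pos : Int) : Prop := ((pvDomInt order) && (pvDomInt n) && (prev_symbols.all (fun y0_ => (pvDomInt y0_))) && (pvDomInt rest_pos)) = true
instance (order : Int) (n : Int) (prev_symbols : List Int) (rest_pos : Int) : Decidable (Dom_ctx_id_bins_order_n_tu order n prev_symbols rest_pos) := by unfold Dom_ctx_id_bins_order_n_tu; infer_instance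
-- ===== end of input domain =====

-- B never computes the 0/1/2 digit or a running offset: it splits the base-3 value via
-- digit = [n<=p] + [n==p] into two independent filtered power sums (objective: alternative).

-- ===== PORT A =====
-- the 0/1/2 digit A computes from n vs prev_symbols[o] (same branches, in order)
def pvDigit (n : Int) (prev_symbols : List Int) (o : Int) : Int :=
  if n > PySem.List.pyGetD prev_symbols o 0 then 0
  else if n < PySem.List.pyGetD prev_symbols o 0 then 1
  else 2

def ctx_id_bins_order_n_tu (order : Int) (n : Int) (prev_symbols : List Int) (rest_pos : Int) : Int :=
  if n < rest_pos then
    -- loop state (ctx_id, offset), started at (0, rest_pos); prev_symbols[o] is in range under Pre_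
    ((PySem.List.pyRange 0 order 1).foldl (fun (st : Int × Int) o =>
      (st.1 + pvDigit n prev_symbols o * st.2, st.2 * 3)) (0, rest_pos)).1 + n
  else
    3 ^ order.toNat * rest_pos

-- ===== PORT B =====
def ctx_id_bins_order_n_tu_alt (order : Int) (n : Int) (prev_symbols : List Int) (rest_pos : Int) : Int :=
  if n < rest_pos then
    -- two staged filtered sums of powers of 3, as in Source B
    let le_sum := (PySem.List.pyRange 0 order 1).foldl
      (fun (s : Int) o => if n ≤ PySem.List.pyGetD prev_symbols o 0 then s + 3 ^ o.toNat else s) 0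
    let eq_sum := (PySem.List.pyRange 0 order 1).foldl
      (fun (s : Int) o => if n = PySem.List.pyGetD prev_symbols o 0 then s + 3 ^ o.toNat else s) 0
    (le_sum + eq_sum) * rest_pos + n
  else
    3 ^ order.toNat * rest_pos

-- ===== PRECONDITION & SPEC =====
-- Pre_ excludes exactly the inputs where Python A leaves the Int type or raises:
-- if n < rest_pos and order > len(prev_symbols), prev_symbols[o] raises (IndexError);
-- if n ≥ rest_pos and order < 0, A returns the float 3**order * rest_pos (B does the same).
def Pre_ctx_id_bins_order_n_tu (order : Int) (n : Int) (prev_symbols : List Int) (rest_pos : Int) : Prop :=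
  (n < rest_pos → order ≤ (prev_symbols.length : Int)) ∧ (¬ n < rest_pos → 0 ≤ order)
instance (order : Int) (n : Int) (prev_symbols : List Int) (rest_pos : Int) : Decidable (Pre_ctx_id_bins_order_n_tu order n prev_symbols rest_pos) := by unfold Pre_ctx_id_bins_order_n_tu; infer_instance

def pvWitness_ctx_id_bins_order_n_tu : Int × Int × List Int × Int := (2, 3, [1, 5], 10)

def Spec_ctx_id_bins_order_n_tu (order : Int) (n : Int) (prev_symbols : List Int) (rest_pos : Int) (out : Int) : Prop := out = ctx_id_bins_order_n_tu_alt order n prev_symbols rest_pos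
instance (order : Int) (n : Int) (prev_symbols : List Int) (rest_pos : Int) (out : Int) : Decidable (Spec_ctx_id_bins_order_n_tu order n prev_symbols rest_pos out) := by unfold Spec_ctx_id_bins_order_n_tu; infer_instance

-- ===== CLAIM =====
def Claim_equal_ctx_id_bins_order_n_tu : Prop := ∀ (order : Int) (n : Int) (prev_symbols : List Int) (rest_pos : Int), Dom_ctx_id_bins_order_n_tu order n prev_symbols rest_pos → Pre_ctx_id_bins_order_n_tu order n prev_symbols rest_pos → Spec_ctx_id_bins_order_n_tu order n prev_symbols rest_pos (ctx_id_bins_order_n_tu order n prev_symbols rest_pos)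

-- ===== LEMMAS AND PROOFS =====

-- A's (ctx_id, offset) pair fold over any index list, in closed form: the first component is
-- c + off · H L where H is the positional base-3 value of the digits, the second is off · 3^|L|.
def pvH (n : Int) (prev_symbols : List Int) (L : List Int) : Int :=
  L.foldr (fun o v => pvDigit n prev_symbols o + 3 * v) 0

theorem pv_fold_pair (n : Int) (prev_symbols : List Int) :
    ∀ (L : List Int) (c off : Int),
      L.foldl (fun (st : Int × Int) o =>
          (st.1 + pvDigit n prev_symbols o * st.2, st.2 * 3)) (c, off)
        = (c + off * pvH n prev_symbols L, off * 3 ^ L.length) := by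
  intro L
  induction L with
  | nil => intro c off; simp [pvH]
  | cons o L ih =>
      intro c off
      simp only [List.foldl_cons, ih, pvH, List.foldr_cons, List.length_cons, pow_succ]
      exact Prod.ext (by ring) (by ring)

-- On range lists, H equals B's two filtered power sums: the digit identity
-- digit = [n ≤ p] + [n = p], with positional weight 3^o matching the element o.
theorem pv_H_eq_sums (n : Int) (prev_symbols : List Int) :
    ∀ (k : Nat),
      pvH n prev_symbols (PySem.List.pyRange 0 (k : Int) 1)
        = (PySem.List.pyRange 0 (k : Int) 1).foldl
            (fun (s : Int) o => if n ≤ PySem.List.pyGetD prev_symbols o 0 then s + 3 ^ o.toNat else s) 0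
          + (PySem.List.pyRange 0 (k : Int) 1).foldl
            (fun (s : Int) o => if n = PySem.List.pyGetD prev_symbols o 0 then s + 3 ^ o.toNat else s) 0 := by
  -- first, H over an appended range splits with weight 3^length; we do induction on k
  intro k
  induction k with
  | zero => simp [pvH, PySem.List.pyRange_one_eq_nil]
  | succ k ih =>
      have hsplit : PySem.List.pyRange 0 ((k + 1 : Nat) : Int) 1
          = PySem.List.pyRange 0 (k : Int) 1 ++ [(k : Int)] := by
        push_cast
        exact PySem.List.pyRange_one_succ_right (by positivity)
      have hH : ∀ (L : List Int) (o : Int),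
          pvH n prev_symbols (L ++ [o])
            = pvH n prev_symbols L + 3 ^ L.length * pvDigit n prev_symbols o := by
        intro L o
        induction L with
        | nil => simp [pvH]
        | cons x L ihL =>
            simp only [pvH, List.cons_append, List.foldr_cons] at *
            rw [ihL]; simp only [List.length_cons, pow_succ]; ring
      have hlen : (PySem.List.pyRange 0 (k : Int) 1).length = k := by
        rw [PySem.List.length_pyRange_one]; simp
      rw [hsplit, hH, List.foldl_append, List.foldl_append, hlen, ih]
      simp only [List.foldl_cons, List.foldl_nil]
      have htn : ((k : Int)).toNat = k := by simp
      rw [htn]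
      unfold pvDigit
      rcases lt_trichotomy n (PySem.List.pyGetD prev_symbols (k : Int) 0) with h | h | h
      · rw [if_neg (by omega), if_pos h, if_pos (le_of_lt h), if_neg (by omega)]; ring
      · rw [if_neg (by omega), if_neg (by omega), if_pos (le_of_eq h), if_pos h]; ring
      · rw [if_pos h, if_neg (by omega), if_neg (by omega)]; ring

-- ===== VERDICT =====
theorem ctx_id_bins_order_n_tu_spec : Claim_equal_ctx_id_bins_order_n_tu := by
  intro order n prev_symbols rest_pos _ _
  unfold Spec_ctx_id_bins_order_n_tu ctx_id_bins_order_n_tu ctx_id_bins_order_n_tu_alt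
  by_cases h : n < rest_pos
  · simp only [h, if_true]
    by_cases hord : order ≤ 0
    · rw [PySem.List.pyRange_one_eq_nil hord]; simp
    · have hk : order = (order.toNat : Int) := by omega
      rw [hk, pv_fold_pair, pv_H_eq_sums]
      ring
  · simp [h]
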